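-- pv_equiv track=rewrite | github.com/rishabh279/Data-Structures-Python | strings/11)check_circular.py | check_circular
-- ===== SOURCE A (Python) =====
-- def check_circular(path):
--     """Check whether given path is circular or Not"""
--     N, E, S, W = 0, 1, 2, 3
--     x, y, dir = 0, 0, N
--
--     for i in range(len(path)):
--         if path[i] == 'R':
--             dir = (1 + dir) % 4
--         elif path[i] == 'L':
--             dir = (4 + dir -1) % 4
--         elif path[i] == 'G':
--             if dir == N:
--                 y += 1
--             elif dir == S:
--                 y -= 1
--             elif dir == E:
--                 x += 1
--             elif dir == W:
--                 x -= 1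
--
--     return x == 0 and y == 0
-- ===== SOURCE B (Python) =====
-- def check_circular(path):
--     """Check whether given path is circular or Not"""
--     # Divide and conquer over the rigid-motion monoid: every path segment is
--     # summarised by a transform (r, x, y) -- a net quarter-turn count r (clockwise,
--     # mod 4) plus a translation (x, y) in the segment's starting frame.  Segments
--     # compose by rotating the second translation by the first segment's rotation.
--     def trans(s):
--         if len(s) == 0:
--             return (0, 0, 0)
--         if len(s) == 1:
--             if s == 'G':
--                 return (0, 0, 1)
--             if s == 'R':
--                 return (1, 0, 0)
--             if s == 'L':
--                 return (3, 0, 0)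
--             return (0, 0, 0)
--         m = len(s) // 2
--         r1, x1, y1 = trans(s[:m])
--         r2, x2, y2 = trans(s[m:])
--         for _ in range(r1):
--             x2, y2 = y2, -x2  # rotate clockwise a quarter turn
--         return ((r1 + r2) % 4, x1 + x2, y1 + y2)
--
--     r, x, y = trans(path)
--     return x == 0 and y == 0
-- ===== Notes on version B (the rewrite author's own statement) =====
-- stated objective: alternative
-- what changed: Replaces the sequential position/direction simulation with a divide-and-conquer reduction over the rigid-motion monoid: each half of the path is summarised by a (rotation, translation) transform and the two transforms are composed.
import Mathlib
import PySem

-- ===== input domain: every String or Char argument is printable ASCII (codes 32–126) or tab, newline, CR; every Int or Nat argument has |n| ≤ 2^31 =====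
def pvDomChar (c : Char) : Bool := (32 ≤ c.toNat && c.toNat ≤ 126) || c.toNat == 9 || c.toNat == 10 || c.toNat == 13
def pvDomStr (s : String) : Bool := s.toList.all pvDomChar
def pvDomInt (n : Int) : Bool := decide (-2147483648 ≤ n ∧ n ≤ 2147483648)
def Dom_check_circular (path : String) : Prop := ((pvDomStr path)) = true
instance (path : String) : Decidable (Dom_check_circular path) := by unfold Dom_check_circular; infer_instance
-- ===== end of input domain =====

-- B replaces A's sequential position/direction simulation with a divide-and-conquer
-- reduction over the rigid-motion monoid (alternative algorithm); return values proved equal.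

-- ===== PORT A =====
-- state (x, y, dir); dir: N=0, E=1, S=2, W=3
def pvAStep (s : Int × Int × Int) (c : Char) : Int × Int × Int :=
  if c = 'R' then (s.1, s.2.1, PySem.Int.mod (1 + s.2.2) 4)
  else if c = 'L' then (s.1, s.2.1, PySem.Int.mod (4 + s.2.2 - 1) 4)
  else if c = 'G' then
    if s.2.2 = 0 then (s.1, s.2.1 + 1, s.2.2)
    else if s.2.2 = 2 then (s.1, s.2.1 - 1, s.2.2)
    else if s.2.2 = 1 then (s.1 + 1, s.2.1, s.2.2)
    else if s.2.2 = 3 then (s.1 - 1, s.2.1, s.2.2)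
    else s
  else s

def check_circular (path : String) : Bool :=
  let s := path.toList.foldl pvAStep (0, 0, 0)
  s.1 == 0 && s.2.1 == 0

-- ===== PORT B =====
-- trans s = (r, x, y): net clockwise quarter-turn count r (mod 4) and translation (x, y)
-- of the segment, in the segment's starting frame; halves composed by rotating the
-- second translation r1 times (the 'for _ in range(r1)' loop of Source B).
def pvTrans : List Char → Int × Int × Int
  | [] => (0, 0, 0)
  | [c] =>
      if c = 'G' then (0, 0, 1)
      else if c = 'R' then (1, 0, 0)
      else if c = 'L' then (3, 0, 0)
      else (0, 0, 0)
  | c1 :: c2 :: rest =>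
      let l := c1 :: c2 :: rest
      let m := l.length / 2
      let t1 := pvTrans (l.take m)
      let t2 := pvTrans (l.drop m)
      let v := (PySem.List.pyRange 0 t1.1 1).foldl (fun v _ => (v.2, -v.1)) (t2.2.1, t2.2.2)
      (PySem.Int.mod (t1.1 + t2.1) 4, t1.2.1 + v.1, t1.2.2 + v.2)
  termination_by l => l.length
  decreasing_by
    · simp [List.length_take]; omega
    · simp; omega

def check_circular_alt (path : String) : Bool :=
  let t := pvTrans path.toList
  t.2.1 == 0 && t.2.2 == 0

-- ===== PRECONDITION & SPEC =====
def Spec_check_circular (path : String) (out : Bool) : Prop := out = check_circular_alt path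
instance (path : String) (out : Bool) : Decidable (Spec_check_circular path out) := by unfold Spec_check_circular; infer_instance

-- ===== CLAIM (what is proved, stated in full; the proofs are below) =====
def Claim_equal_check_circular : Prop := ∀ (path : String), Dom_check_circular path → Spec_check_circular path (check_circular path)

-- ===== LEMMAS AND PROOFS =====

-- PySem.Int.mod with positive divisor is Int.emod (omega-friendly)
theorem pv_mod4 (a : Int) : PySem.Int.mod a 4 = a % 4 :=
  PySem.Int.mod_eq_emod_of_pos (by norm_num)

-- rotate a vector clockwise d quarter-turns, d ∈ {0,1,2,3}
def pvRotK (d : Int) (v : Int × Int) : Int × Int :=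
  if d = 0 then v
  else if d = 1 then (v.2, -v.1)
  else if d = 2 then (-v.1, -v.2)
  else (-v.2, v.1)

theorem pvTrans_r_range (l : List Char) :
    0 ≤ (pvTrans l).1 ∧ (pvTrans l).1 < 4 := by
  induction l using pvTrans.induct with
  | case1 => simp [pvTrans]
  | case2 => simp [pvTrans]
  | case3 h => simp [pvTrans, h]
  | case4 h1 h2 => simp [pvTrans, h1, h2]
  | case5 c h1 h2 h3 => simp [pvTrans, h1, h2, h3]
  | case6 c1 c2 rest _l _m ih1 ih2 =>
      rw [pvTrans]
      simp only [pv_mod4]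
      omega

-- the rotation loop of Source B, for r ∈ {0,1,2,3}, is pvRotK r
theorem pv_loop_eq_rotK (r : Int) (hr0 : 0 ≤ r) (hr1 : r < 4) (v : Int × Int) :
    (PySem.List.pyRange 0 r 1).foldl (fun v _ => (v.2, -v.1)) v = pvRotK r v := by
  interval_cases r <;>
    simp [PySem.List.pyRange_one, List.range_succ, pvRotK]

theorem pvRotK_comp (d r : Int) (hd0 : 0 ≤ d) (hd1 : d < 4) (hr0 : 0 ≤ r) (hr1 : r < 4)
    (a1 a2 b1 b2 : Int) :
    pvRotK d (a1 + (pvRotK r (b1, b2)).1, a2 + (pvRotK r (b1, b2)).2) =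
      ((pvRotK d (a1, a2)).1 + (pvRotK (PySem.Int.mod (d + r) 4) (b1, b2)).1,
       (pvRotK d (a1, a2)).2 + (pvRotK (PySem.Int.mod (d + r) 4) (b1, b2)).2) := by
  simp only [pv_mod4]
  interval_cases d <;> interval_cases r <;>
    simp [pvRotK] <;> ring_nf <;> simp

-- A's fold from any state equals applying the B transform of the segment
theorem pv_main (l : List Char) :
    ∀ (x y d : Int), 0 ≤ d → d < 4 →
      l.foldl pvAStep (x, y, d) =
        (x + (pvRotK d ((pvTrans l).2.1, (pvTrans l).2.2)).1,
         y + (pvRotK d ((pvTrans l).2.1, (pvTrans l).2.2)).2,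
         PySem.Int.mod (d + (pvTrans l).1) 4) := by
  induction l using pvTrans.induct with
  | case1 =>
      intro x y d hd0 hd1
      simp only [pvTrans, List.foldl_nil, pv_mod4, pvRotK]
      interval_cases d <;> simp
  | case2 =>
      intro x y d hd0 hd1
      simp only [pvTrans, List.foldl_cons, List.foldl_nil, pvAStep, pv_mod4]
      interval_cases d <;> simp [pvRotK] <;> omega
  | case3 h =>
      intro x y d hd0 hd1
      simp only [pvTrans, List.foldl_cons, List.foldl_nil, pvAStep, pv_mod4, h]
      interval_cases d <;> simp [pvRotK]
  | case4 h1 h2 =>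
      intro x y d hd0 hd1
      simp only [pvTrans, List.foldl_cons, List.foldl_nil, pvAStep, pv_mod4, h1, h2]
      interval_cases d <;> simp [pvRotK]
  | case5 c h1 h2 h3 =>
      intro x y d hd0 hd1
      simp only [pvTrans, List.foldl_cons, List.foldl_nil, pvAStep, pv_mod4, h1, h2, h3]
      interval_cases d <;> simp [pvRotK]
  | case6 c1 c2 rest _l _m ih1 ih2 =>
      intro x y d hd0 hd1
      rw [show (c1 :: c2 :: rest) = List.take ((c1 :: c2 :: rest).length / 2) (c1 :: c2 :: rest) ++ List.drop ((c1 :: c2 :: rest).length / 2) (c1 :: c2 :: rest) from (List.take_append_drop _ _).symm,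
          List.foldl_append]
      set l1 := List.take ((c1 :: c2 :: rest).length / 2) (c1 :: c2 :: rest) with hl1
      set l2 := List.drop ((c1 :: c2 :: rest).length / 2) (c1 :: c2 :: rest) with hl2
      obtain ⟨h10, h11⟩ := pvTrans_r_range l1
      obtain ⟨h20, h21⟩ := pvTrans_r_range l2
      have hd' : 0 ≤ PySem.Int.mod (d + (pvTrans l1).1) 4 := by rw [pv_mod4]; omega
      have hd'' : PySem.Int.mod (d + (pvTrans l1).1) 4 < 4 := by rw [pv_mod4]; omega
      rw [ih1 x y d hd0 hd1, ih2 _ _ _ hd' hd'']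
      have hTrans : pvTrans (l1 ++ l2) =
          (PySem.Int.mod ((pvTrans l1).1 + (pvTrans l2).1) 4,
           (pvTrans l1).2.1 + (pvRotK (pvTrans l1).1 ((pvTrans l2).2.1, (pvTrans l2).2.2)).1,
           (pvTrans l1).2.2 + (pvRotK (pvTrans l1).1 ((pvTrans l2).2.1, (pvTrans l2).2.2)).2) := by
        conv_lhs => rw [hl1, hl2, List.take_append_drop]
        rw [pvTrans]
        rw [pv_loop_eq_rotK _ h10 h11]
      rw [hTrans]
      have hcomp := pvRotK_comp d (pvTrans l1).1 hd0 hd1 h10 h11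
        (pvTrans l1).2.1 (pvTrans l1).2.2 (pvTrans l2).2.1 (pvTrans l2).2.2
      rw [hcomp]
      simp only [Prod.mk.injEq]
      refine ⟨?_, ?_, ?_⟩ <;> simp <;> omega

-- ===== VERDICT (by name: the statement is the Claim_ definition above) =====
theorem check_circular_spec : Claim_equal_check_circular := by
  intro path _
  unfold Spec_check_circular check_circular check_circular_alt
  rw [pv_main path.toList 0 0 0 (by norm_num) (by norm_num)]
  simp [pvRotK]
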